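-- pv_equiv track=rewrite | github.com/sarishvili-ioane/GOA | Day 56/claswork/clasworck2.py | remove_max
-- ===== SOURCE A (Python) =====
-- def remove_max(lst):
--     if not lst:
--         return "The list is empty."
--
--     max_value = lst[0]
--
--     for num in lst:
--         if num > max_value:
--             max_value = num
--
--     lst.remove(max_value)
--     return lst
-- ===== SOURCE B (Python) =====
-- def remove_max(lst):
--     if not lst:
--         return "The list is empty."
--     # backward pass: k = index of the first occurrence of the max of lst[i:]
--     k = len(lst) - 1
--     for i in range(len(lst) - 2, -1, -1):
--         if lst[i] >= lst[k]:
--             k = i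
--     return lst[:k] + lst[k + 1:]
-- ===== Notes on version B (the rewrite author's own statement) =====
-- stated objective: alternative
-- what changed: single backward index pass tracking the index of the first occurrence of the maximum, then rebuilding the result from two slices, instead of A's max-value scan followed by a mutating .remove scan
import Mathlib
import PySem

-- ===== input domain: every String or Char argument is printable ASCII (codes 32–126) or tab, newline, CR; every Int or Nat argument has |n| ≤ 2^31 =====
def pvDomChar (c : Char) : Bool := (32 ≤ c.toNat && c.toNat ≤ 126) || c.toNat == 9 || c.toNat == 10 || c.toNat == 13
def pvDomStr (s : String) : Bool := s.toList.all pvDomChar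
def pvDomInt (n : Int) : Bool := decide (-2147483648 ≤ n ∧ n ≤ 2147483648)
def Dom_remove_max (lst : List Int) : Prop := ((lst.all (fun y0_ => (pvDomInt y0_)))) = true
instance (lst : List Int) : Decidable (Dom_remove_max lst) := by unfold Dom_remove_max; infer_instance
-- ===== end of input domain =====

-- B replaces A's two scans (find max value, then a mutating .remove scan) by one backward
-- index pass tracking the index of the first maximum, then rebuilds the result from two slices; alternative decomposition.
-- A mutates the caller's list in place, B does not; the equivalence proved is about the return value.


-- ===== PORT A =====
def remove_max (lst : List Int) : List Int :=
  match lst with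
  | [] => []          -- Python returns the string "The list is empty." here; excluded by Pre_
  | a :: _ =>
    let max_value := lst.foldl (fun m n => if n > m then n else m) a
    match PySem.List.remove? lst max_value with
    | some r => r
    | none => []      -- unreachable: max_value is an element of lst

-- ===== PORT B =====
-- backward index pass: k = index of the first occurrence of the max of the suffix lst[i:]
-- seen so far; then the result is rebuilt as lst[:k] + lst[k+1:] (lst[i], lst[k] in range
-- throughout, so getD's default is never used)
def remove_max_alt (lst : List Int) : List Int :=
  match lst with
  | [] => []          -- Python returns the string "The list is empty." here; excluded by Pre_
  | _ :: _ =>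
    let k := (PySem.List.pyRange ((lst.length : Int) - 2) (-1) (-1)).foldl
      (fun (k : Int) (i : Int) =>
        if PySem.List.pyGetD lst i 0 ≥ PySem.List.pyGetD lst k 0 then i else k)
      ((lst.length : Int) - 1)
    PySem.List.slice lst none (some k) ++ PySem.List.slice lst (some (k + 1)) none

-- ===== PRECONDITION & SPEC =====
-- Pre_ excludes only the empty list, on which A returns the string "The list is empty.", not a list of ints.
def Pre_remove_max (lst : List Int) : Prop := lst ≠ []
instance (lst : List Int) : Decidable (Pre_remove_max lst) := by unfold Pre_remove_max; infer_instance
def pvWitness_remove_max : List Int := [3, 7, 7, 2]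
def Spec_remove_max (lst : List Int) (out : List Int) : Prop := out = remove_max_alt lst
instance (lst : List Int) (out : List Int) : Decidable (Spec_remove_max lst out) := by unfold Spec_remove_max; infer_instance

-- ===== CLAIM =====
def Claim_equal_remove_max : Prop :=
  ∀ (lst : List Int), Dom_remove_max lst → Pre_remove_max lst → Spec_remove_max lst (remove_max lst)

-- ===== LEMMAS AND PROOFS =====

-- index (within l) of the first strict improvement chain's endpoint: the first
-- occurrence of the maximum of l, provided that maximum exceeds the incoming value a
def gIdx (a : Int) : List Int → Option Nat
  | [] => none
  | b :: rs =>
    if b > a then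
      match gIdx b rs with
      | some j => some (j + 1)
      | none => some 0
    else (gIdx a rs).map (· + 1)

-- common description of both results on a :: rest
def delMax (a : Int) (rest : List Int) : List Int :=
  match gIdx a rest with
  | none => rest
  | some j => a :: rest.eraseIdx j

-- F a rest: index, within a :: rest, of the first occurrence of the maximum of a :: rest
def F (a : Int) (rest : List Int) : Nat :=
  match gIdx a rest with
  | none => 0
  | some j => j + 1

theorem foldl_if_eq_foldl_max (l : List Int) (a : Int) :
    l.foldl (fun m n => if n > m then n else m) a = l.foldl max a := by
  induction l generalizing a with
  | nil => rfl
  | cons b rs ih =>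
    simp only [List.foldl_cons, ih]
    congr 1
    simp only [max_def]
    split_ifs <;> omega

theorem foldl_max_comm (l : List Int) (a b : Int) :
    l.foldl max (max a b) = max a (l.foldl max b) := by
  induction l generalizing b with
  | nil => rfl
  | cons c rs ih =>
    simp only [List.foldl_cons, max_assoc, ih]

theorem le_foldl_max (l : List Int) (a : Int) : a ≤ l.foldl max a := by
  induction l generalizing a with
  | nil => exact le_refl a
  | cons b rs ih => exact le_trans (le_max_left a b) (ih (max a b))

theorem mem_le_foldl_max (l : List Int) (a x : Int) (hx : x ∈ l) : x ≤ l.foldl max a := by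
  induction l generalizing a with
  | nil => cases hx
  | cons b rs ih =>
    rcases List.mem_cons.1 hx with h | h
    · subst h; exact le_trans (le_max_right a x) (le_foldl_max rs (max a x))
    · exact ih (max a b) h

theorem foldl_max_eq_self (l : List Int) (b : Int) (h : ∀ x ∈ l, x ≤ b) :
    l.foldl max b = b := by
  induction l generalizing b with
  | nil => rfl
  | cons d rs ih =>
    simp only [List.foldl_cons]
    have hd : d ≤ b := h d List.mem_cons_self
    rw [show max b d = b from by omega]
    exact ih b (fun x hx => h x (List.mem_cons_of_mem _ hx))

theorem gIdx_none_iff (l : List Int) (a : Int) :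
    gIdx a l = none ↔ ∀ x ∈ l, x ≤ a := by
  induction l generalizing a with
  | nil => simp [gIdx]
  | cons b rs ih =>
    simp only [gIdx]
    by_cases hb : b > a
    · rw [if_pos hb]
      constructor
      · intro h; exfalso; cases hgb : gIdx b rs <;> simp [hgb] at h
      · intro h; exact absurd (h b List.mem_cons_self) (by omega)
    · simp only [if_neg hb, Option.map_eq_none_iff, ih, List.mem_cons]
      constructor
      · rintro h x (rfl | hx)
        · omega
        · exact h x hx
      · intro h x hx; exact h x (Or.inr hx)

theorem gIdx_lt (l : List Int) (a : Int) (j : Nat) (h : gIdx a l = some j) : j < l.length := by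
  induction l generalizing a j with
  | nil => simp [gIdx] at h
  | cons b rs ih =>
    simp only [gIdx] at h
    by_cases hb : b > a
    · rw [if_pos hb] at h
      cases hgb : gIdx b rs with
      | none => rw [hgb] at h; simp at h; subst h; simp
      | some j' =>
        rw [hgb] at h; simp at h; subst h
        have := ih b j' hgb; simpa using Nat.succ_lt_succ this
    · rw [if_neg hb] at h
      cases hga : gIdx a rs with
      | none => rw [hga] at h; simp at h
      | some j' =>
        rw [hga] at h; simp at h; subst h
        have := ih a j' hga; simpa using Nat.succ_lt_succ this

theorem gIdx_congr (l : List Int) (a b : Int) (hba : b ≤ a) (h : a < l.foldl max b) :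
    gIdx a l = gIdx b l := by
  induction l generalizing a b with
  | nil => exact absurd h (by simp; omega)
  | cons c rs ih =>
    simp only [List.foldl_cons] at h
    simp only [gIdx]
    by_cases hc : c > a
    · rw [if_pos hc, if_pos (by omega : c > b)]
    · rw [if_neg hc]
      by_cases hcb : c > b
      · rw [if_pos hcb]
        have hmax : max b c = c := by omega
        rw [hmax] at h
        have hga : gIdx a rs = gIdx c rs := ih a c (by omega) h
        cases hgc : gIdx c rs with
        | none =>
          exfalso
          have hall := (gIdx_none_iff rs c).1 hgc
          have := foldl_max_eq_self rs c hall
          omega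
        | some j => simp [hga, hgc]
      · rw [if_neg hcb]
        have hmax : max b c = b := by omega
        rw [hmax] at h
        rw [ih a b hba h]

theorem remove_eq_delMax (rest : List Int) (a : Int) :
    PySem.List.remove? (a :: rest) (rest.foldl max a) = some (delMax a rest) := by
  induction rest generalizing a with
  | nil =>
    simp [delMax, gIdx, PySem.List.remove?_cons_self]
  | cons b rs ih =>
    have hM : (b :: rs).foldl max a = max a (rs.foldl max b) := by
      simp only [List.foldl_cons]; exact foldl_max_comm rs a b
    by_cases hgt : rs.foldl max b > a
    · have hM' : (b :: rs).foldl max a = rs.foldl max b := by rw [hM]; omega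
      rw [hM']
      have hne : a ≠ rs.foldl max b := by omega
      rw [PySem.List.remove?_cons_of_ne (b :: rs) hne, ih b, Option.map_some]
      congr 1
      simp only [delMax, gIdx]
      by_cases hb : b > a
      · rw [if_pos hb]
        cases hgb : gIdx b rs with
        | none => simp [List.eraseIdx]
        | some j => simp [List.eraseIdx]
      · rw [if_neg hb]
        have hcong : gIdx a rs = gIdx b rs := gIdx_congr rs a b (by omega) hgt
        cases hgb : gIdx b rs with
        | none =>
          exfalso
          have hall := (gIdx_none_iff rs b).1 hgb
          have := foldl_max_eq_self rs b hall
          omega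
        | some j => rw [hcong, hgb]; simp [List.eraseIdx]
    · have hM' : (b :: rs).foldl max a = a := by rw [hM]; omega
      rw [hM', PySem.List.remove?_cons_self]
      have hball : ∀ x ∈ b :: rs, x ≤ a := by
        intro x hx
        have := mem_le_foldl_max (b :: rs) a x hx
        rw [hM] at this; omega
      have : gIdx a (b :: rs) = none := (gIdx_none_iff (b :: rs) a).2 hball
      simp [delMax, this]

-- F is in range
theorem F_lt (a : Int) (rest : List Int) : F a rest < (a :: rest).length := by
  unfold F
  cases hg : gIdx a rest with
  | none => simp
  | some j => have := gIdx_lt rest a j hg; simp; omega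

-- the element at index F is the maximum
theorem getElem_F (a : Int) (rest : List Int) :
    (a :: rest)[F a rest]'(F_lt a rest) = rest.foldl max a := by
  induction rest generalizing a with
  | nil => simp [F, gIdx]
  | cons b rs ih =>
    have hM : (b :: rs).foldl max a = max a (rs.foldl max b) := by
      simp only [List.foldl_cons]; exact foldl_max_comm rs a b
    by_cases hgt : rs.foldl max b > a
    · -- the max lives in b :: rs: F points one past, into the recursive answer
      have hFa : F a (b :: rs) = F b rs + 1 := by
        unfold F
        simp only [gIdx]
        by_cases hb : b > a
        · rw [if_pos hb]
          cases hgb : gIdx b rs <;> simp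
        · rw [if_neg hb]
          have hcong : gIdx a rs = gIdx b rs := gIdx_congr rs a b (by omega) hgt
          cases hgb : gIdx b rs with
          | none =>
            exfalso
            have := foldl_max_eq_self rs b ((gIdx_none_iff rs b).1 hgb)
            omega
          | some j => rw [hcong, hgb]; rfl
      have hbound := F_lt b rs
      have : (a :: b :: rs)[F a (b :: rs)]'(F_lt a (b :: rs)) = (b :: rs)[F b rs]'hbound := by
        simp only [hFa]
        simp [List.getElem_cons_succ]
      rw [this, ih b, hM]
      omega
    · -- a itself is the max: F = 0
      have hall : ∀ x ∈ b :: rs, x ≤ a := by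
        intro x hx
        have := mem_le_foldl_max (b :: rs) a x hx
        rw [hM] at this; omega
      have hg : gIdx a (b :: rs) = none := (gIdx_none_iff (b :: rs) a).2 hall
      have hFa : F a (b :: rs) = 0 := by unfold F; rw [hg]
      have hfx : (b :: rs).foldl max a = a := by rw [hM]; omega
      simp only [hFa, hfx, List.getElem_cons_zero]

-- F steps by one when the head is not the new first max
theorem F_cons_of_lt (x y : Int) (rs : List Int) (h : x < rs.foldl max y) :
    F x (y :: rs) = F y rs + 1 := by
  unfold F
  simp only [gIdx]
  by_cases hy : y > x
  · rw [if_pos hy]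
    cases hgy : gIdx y rs <;> simp
  · rw [if_neg hy]
    have hcong : gIdx x rs = gIdx y rs := gIdx_congr rs x y (by omega) h
    cases hgy : gIdx y rs with
    | none =>
      exfalso
      have := foldl_max_eq_self rs y ((gIdx_none_iff rs y).1 hgy)
      omega
    | some j => rw [hcong, hgy]; rfl

-- delMax is erasure at index F
theorem delMax_eq_eraseIdx (a : Int) (rest : List Int) :
    delMax a rest = (a :: rest).eraseIdx (F a rest) := by
  unfold delMax F
  cases hg : gIdx a rest with
  | none => simp
  | some j => simp [List.eraseIdx]

-- B's loop body, named for the invariant proof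
def bBody (lst : List Int) (k i : Int) : Int :=
  if PySem.List.pyGetD lst i 0 ≥ PySem.List.pyGetD lst k 0 then i else k

-- getD at a Nat index in range is getElem
theorem pyGetD_nat (lst : List Int) (i : Nat) (hi : i < lst.length) :
    PySem.List.pyGetD lst (i : Int) 0 = lst[i]'hi := by
  rw [PySem.List.pyGetD_natCast, List.getD_eq_getElem?_getD, List.getElem?_eq_getElem hi]
  rfl

-- one loop step from the first-max index of suffix i+1 reaches that of suffix i
theorem bBody_step (lst : List Int) (i : Nat) (hi : i + 1 < lst.length) :
    bBody lst (((i + 1) + F (lst[i + 1]'hi) (lst.drop (i + 2)) : Nat) : Int) (i : Int)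
      = ((i + F (lst[i]'(by omega)) (lst.drop (i + 1)) : Nat) : Int) := by
  have hdrop : lst.drop (i + 1) = lst[i + 1]'hi :: lst.drop (i + 2) := by
    rw [List.drop_eq_getElem_cons hi]
  have hkbound : (i + 1) + F (lst[i + 1]'hi) (lst.drop (i + 2)) < lst.length := by
    have h1 := F_lt (lst[i + 1]'hi) (lst.drop (i + 2))
    have h2 : (lst[i + 1]'hi :: lst.drop (i + 2)).length = lst.length - (i + 1) := by
      rw [← hdrop]; simp
    omega
  have hgk : PySem.List.pyGetD lst (((i + 1) + F (lst[i + 1]'hi) (lst.drop (i + 2)) : Nat) : Int) 0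
      = (lst.drop (i + 2)).foldl max (lst[i + 1]'hi) := by
    rw [pyGetD_nat lst _ hkbound]
    have hlen : F (lst[i + 1]'hi) (lst.drop (i + 2)) < (lst.drop (i + 1)).length := by
      have h1 := F_lt (lst[i + 1]'hi) (lst.drop (i + 2))
      rw [hdrop]; simpa using h1
    have h3 : lst[(i + 1) + F (lst[i + 1]'hi) (lst.drop (i + 2))]'hkbound
        = (lst.drop (i + 1))[F (lst[i + 1]'hi) (lst.drop (i + 2))]'hlen := by
      rw [List.getElem_drop]
    rw [h3, List.getElem_of_eq hdrop]
    exact getElem_F _ _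
  have hgi : PySem.List.pyGetD lst (i : Int) 0 = lst[i]'(by omega) := pyGetD_nat lst i (by omega)
  unfold bBody
  rw [hgk, hgi]
  by_cases h : lst[i]'(by omega : i < lst.length) ≥ (lst.drop (i + 2)).foldl max (lst[i + 1]'hi)
  · rw [if_pos h]
    -- lst[i] dominates the whole suffix: F of suffix i is 0
    have hall : ∀ x ∈ lst.drop (i + 1), x ≤ lst[i]'(by omega) := by
      intro x hx
      rw [hdrop] at hx
      have := mem_le_foldl_max (lst[i + 1]'hi :: lst.drop (i + 2)) (lst[i]'(by omega)) x hx
      have hM : (lst[i + 1]'hi :: lst.drop (i + 2)).foldl max (lst[i]'(by omega))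
          = max (lst[i]'(by omega)) ((lst.drop (i + 2)).foldl max (lst[i + 1]'hi)) := by
        simp only [List.foldl_cons]; exact foldl_max_comm _ _ _
      rw [hM] at this; omega
    have : F (lst[i]'(by omega)) (lst.drop (i + 1)) = 0 := by
      unfold F
      rw [(gIdx_none_iff (lst.drop (i + 1)) _).2 hall]
    rw [this]
    simp
  · rw [if_neg h]
    have hF : F (lst[i]'(by omega)) (lst.drop (i + 1))
        = F (lst[i + 1]'hi) (lst.drop (i + 2)) + 1 := by
      rw [hdrop]
      exact F_cons_of_lt _ _ _ (by omega)
    rw [hF]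
    push_cast
    ring

-- loop invariant: running the countdown i-1 .. 0 from the suffix-i index yields the suffix-0 index
theorem bFold_inv (lst : List Int) (i : Nat) (hi : i < lst.length) :
    (PySem.List.pyRange ((i : Int) - 1) (-1) (-1)).foldl (bBody lst)
        (((i + F (lst[i]'hi) (lst.drop (i + 1)) : Nat) : Int))
      = ((F (lst[0]'(by omega)) (lst.drop 1) : Nat) : Int) := by
  induction i with
  | zero =>
    rw [PySem.List.pyRange_neg_one_eq_nil (by norm_num)]
    simp
  | succ k ih =>
    rw [show ((k + 1 : Nat) : Int) - 1 = (k : Int) from by push_cast; ring,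
        PySem.List.pyRange_neg_one_cons (by omega)]
    simp only [List.foldl_cons]
    rw [bBody_step lst k hi]
    exact ih (by omega)

theorem remove_max_eq_delMax (a : Int) (rest : List Int) :
    remove_max (a :: rest) = delMax a rest := by
  unfold remove_max
  simp only [List.foldl_cons, foldl_if_eq_foldl_max]
  rw [show (if a > a then a else a) = a from by omega]
  rw [remove_eq_delMax rest a]

theorem remove_max_alt_eq_delMax (a : Int) (rest : List Int) :
    remove_max_alt (a :: rest) = delMax a rest := by
  show (PySem.List.slice (a :: rest) none (some _) ++ PySem.List.slice (a :: rest) (some (_ + 1)) none) = _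
  have hinit : (((a :: rest).length : Int) - 1)
      = ((rest.length + F ((a :: rest)[rest.length]'(by simp)) ((a :: rest).drop (rest.length + 1)) : Nat) : Int) := by
    have h1 : (a :: rest).drop (rest.length + 1) = [] := by
      apply List.drop_eq_nil_of_le; simp
    rw [h1]
    simp [F, gIdx]
  have hrange : ((a :: rest).length : Int) - 2 = ((rest.length : Nat) : Int) - 1 := by
    simp; omega
  have hbody : (fun (k : Int) (i : Int) =>
      if PySem.List.pyGetD (a :: rest) i 0 ≥ PySem.List.pyGetD (a :: rest) k 0 then i else k)
      = bBody (a :: rest) := rfl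
  have heq : (PySem.List.pyRange (((a :: rest).length : Int) - 2) (-1) (-1)).foldl
      (bBody (a :: rest)) (((a :: rest).length : Int) - 1) = ((F a rest : Nat) : Int) := by
    rw [hrange, hinit]
    exact bFold_inv (a :: rest) rest.length (by simp)
  rw [hbody, heq]
  -- both slices at a Nat index
  rw [PySem.List.slice_to_natCast,
      show ((F a rest : Nat) : Int) + 1 = ((F a rest + 1 : Nat) : Int) from by push_cast; ring,
      PySem.List.slice_from_natCast]
  rw [delMax_eq_eraseIdx, List.eraseIdx_eq_take_drop_succ]

-- ===== VERDICT =====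
theorem remove_max_spec : Claim_equal_remove_max := by
  intro lst _hdom hpre
  unfold Spec_remove_max
  match lst with
  | [] => exact absurd rfl hpre
  | a :: rest => rw [remove_max_eq_delMax, remove_max_alt_eq_delMax]
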